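-- pv_equiv track=rewrite | github.com/yeonnseok/ps-algorithm | past_problems/password.py | solution
-- ===== SOURCE A (Python) =====
-- def check_duple(word):
--     n = len(word)
--     for i in range(n-1):
--         if word[i] == word[i+1]:
--             return True
--     return False
--
-- def solution(cryptogram):
--     # 연속된 중복 문자열이 없을 때까지 반복문을 돌린다.
--     while check_duple(cryptogram):
--         n = len(cryptogram)
--         d = [False] * n  # 현재 암호문의 길이만큼의 boolean 배열을 정의한다.
--         temp = ''
--         for i in range(n):
--             cnt = 0
--             for j in range(i+1, n):
--                 if cryptogram[i] == cryptogram[j]: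
--                     cnt += 1     # 연속으로 중복되는 값이 2개이상 있을 경우 검사를 시작하는 인덱스에 해당하는 d값도 True로 바꾸어준다.
--                     d[j] = True  # 이중 반복문을 통해 연속으로 중복되는 문자의 인덱스에 해당하는 d값을 True로 바꿔준다.
--                 else:
--                     break       # 연속이 끊기면 반복문을 빠져나온다.
--             if cnt > 0:
--                 d[i] = True  # 연속되는 중복 문자열이 있었다면, 검사를 시작한 값도 True 로 바꿔준다.
--         for i in range(n):
--             if not d[i]:
--                 temp += cryptogram[i]  # 현재 문자열의 길이만큼을 순회하며 d값이 False인 값만 새로운 문자열인 temp에 추가한다.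
--         cryptogram = temp  # crpytogram에 temp를 대입해주고 다시 while 반복문을 수행한다.
--     return cryptogram
-- ===== SOURCE B (Python) =====
-- def solution(cryptogram):
--     s = cryptogram
--     n = len(s)
--     t = ''.join(s[i] for i in range(n)
--                 if not (i > 0 and s[i - 1] == s[i])
--                 and not (i + 1 < n and s[i] == s[i + 1]))
--     return t if len(t) == n else solution(t)
-- ===== Notes on version B (the rewrite author's own statement) =====
-- stated objective: faster
-- what changed: A's repeated boolean-marking pass (an O(n^2) nested scan filling a d array, plus a separate check_duple scan driving a while loop) is replaced by a single linear neighbour-comparison pass per round (keep s[i] iff it differs from both neighbours) with recursion until the length stops shrinking.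
import Mathlib
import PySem

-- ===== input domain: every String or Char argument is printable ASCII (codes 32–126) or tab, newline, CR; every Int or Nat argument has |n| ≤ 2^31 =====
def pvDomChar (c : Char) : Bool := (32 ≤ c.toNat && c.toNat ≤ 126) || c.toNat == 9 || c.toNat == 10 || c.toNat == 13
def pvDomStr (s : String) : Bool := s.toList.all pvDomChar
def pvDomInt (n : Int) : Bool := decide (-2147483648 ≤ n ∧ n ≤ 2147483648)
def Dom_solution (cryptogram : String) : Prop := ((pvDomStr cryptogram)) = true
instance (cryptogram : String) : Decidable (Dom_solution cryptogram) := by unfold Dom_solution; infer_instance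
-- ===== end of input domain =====

-- B replaces A's boolean-marking double loop and while-loop by a single neighbour-comparison
-- pass per round plus recursion (objective: faster — linear instead of quadratic work per pass, confirmed).

-- ===== PORT A =====
-- check_duple(word): scan adjacent pairs, True at the first equal pair
def checkDupleL (w : List Char) : Bool :=
  (List.range (w.length - 1)).any (fun i => w.getD i default == w.getD (i+1) default)

-- A's inner 'for j in range(i+1, n): … else: break' loop
def innerA (w : List Char) (ci : Char) (n j cnt : Nat) (d : List Bool) : Nat × List Bool :=
  if j < n then
    if w.getD j default == ci then innerA w ci n (j+1) (cnt+1) (d.set j true)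
    else (cnt, d)
  else (cnt, d)
termination_by n - j

-- one iteration of A's while body: mark d by the double loop, then filter into temp
def passA (w : List Char) : List Char :=
  let n := w.length
  let d := (List.range n).foldl (fun d i =>
    let r := innerA w (w.getD i default) n (i+1) 0 d
    if r.1 > 0 then r.2.set i true else r.2) (List.replicate n false)
  (List.range n).foldl (fun temp i => if d.getD i false then temp else temp ++ [w.getD i default]) []

-- A's while loop; fuel = length + 1 only makes it total (each true test shortens the string)
def loopA (fuel : Nat) (c : List Char) : List Char :=
  match fuel with
  | 0 => c
  | f+1 => if checkDupleL c then loopA f (passA c) else c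

def solution (cryptogram : String) : String :=
  String.ofList (loopA (cryptogram.toList.length + 1) cryptogram.toList)

-- ===== PORT B =====
-- keep s[i] iff it differs from both neighbours
def keepB (s : List Char) (n i : Nat) : Bool :=
  !(decide (0 < i) && (s.getD (i-1) default == s.getD i default)) &&
  !(decide (i+1 < n) && (s.getD i default == s.getD (i+1) default))

def passB (s : List Char) : List Char :=
  ((List.range s.length).filter (fun i => keepB s s.length i)).map (fun i => s.getD i default)

-- cited by solveB's decreasing_by (a pass never lengthens the string)
theorem passB_len_le (s : List Char) : (passB s).length ≤ s.length := by
  simp only [passB, List.length_map]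
  exact le_trans (List.length_filter_le _ _) (by simp)

def solveB (s : List Char) : List Char :=
  let t := passB s
  if t.length == s.length then t else solveB t
termination_by s.length
decreasing_by
  rename_i h
  simp only [beq_iff_eq] at h
  exact lt_of_le_of_ne (passB_len_le s) h

def solution_alt (cryptogram : String) : String :=
  String.ofList (solveB cryptogram.toList)

-- ===== PRECONDITION & SPEC =====
def Spec_solution (cryptogram : String) (out : String) : Prop := out = solution_alt cryptogram
instance (cryptogram : String) (out : String) : Decidable (Spec_solution cryptogram out) := by unfold Spec_solution; infer_instance

-- ===== CLAIM (what is proved, stated in full; the proofs are below) =====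
def Claim_equal_solution : Prop := ∀ (cryptogram : String), Dom_solution cryptogram → Spec_solution cryptogram (solution cryptogram)

-- ===== LEMMAS AND PROOFS =====

-- 'position k has an equal neighbour' (what A's d array ends up recording)
def nbP (w : List Char) (k : Nat) : Prop :=
  (1 ≤ k ∧ w.getD (k-1) default = w.getD k default) ∨
  (k+1 < w.length ∧ w.getD k default = w.getD (k+1) default)

-- 'iteration i of A's outer loop marks position k'
def markP (w : List Char) (i k : Nat) : Prop :=
  (i+1 ≤ k ∧ k < w.length ∧ ∀ m, i+1 ≤ m → m ≤ k → w.getD m default = w.getD i default) ∨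
  (k = i ∧ i+1 < w.length ∧ w.getD (i+1) default = w.getD i default)

theorem innerA_snd_length (w : List Char) (ci : Char) (n j cnt : Nat) (d : List Bool) :
    (innerA w ci n j cnt d).2.length = d.length := by
  fun_induction innerA with
  | case1 => simp_all
  | case2 => simp_all
  | case3 => simp_all

theorem innerA_fst_mono (w : List Char) (ci : Char) (n j cnt : Nat) (d : List Bool) :
    cnt ≤ (innerA w ci n j cnt d).1 := by
  fun_induction innerA with
  | case1 => omega
  | case2 => simp
  | case3 => simp

theorem innerA_fst_pos (w : List Char) (ci : Char) (n j : Nat) (d : List Bool) :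
    0 < (innerA w ci n j 0 d).1 ↔ (j < n ∧ w.getD j default = ci) := by
  rw [innerA]
  split
  · split
    · rename_i h1 h2
      simp only [beq_iff_eq] at h2
      have := innerA_fst_mono w ci n (j+1) 1 (d.set j true)
      constructor
      · intro _; exact ⟨h1, h2⟩
      · intro _
        exact Nat.lt_of_lt_of_le Nat.one_pos (innerA_fst_mono w ci n (j+1) (0+1) (d.set j true))
    · simp_all
  · simp_all

theorem innerA_snd_getD (w : List Char) (ci : Char) (n j cnt : Nat) (d : List Bool)
    (hd : d.length = n) (k : Nat) :
    (innerA w ci n j cnt d).2.getD k false =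
      (d.getD k false ||
        decide (j ≤ k ∧ k < n ∧ ∀ m, j ≤ m → m ≤ k → w.getD m default = ci)) := by
  fun_induction innerA with
  | case1 j cnt d h1 h2 ih =>
    simp only [beq_iff_eq] at h2
    rw [ih (by simp [hd])]
    rcases eq_or_ne k j with rfl | hkj
    · have : (d.set k true).getD k false = true := by
        simp [List.getD_eq_getElem?_getD, hd.symm ▸ h1]
      rw [this]
      simp only [Bool.true_or]
      symm
      simp only [Bool.or_eq_true, decide_eq_true_eq]
      right
      exact ⟨le_refl _, h1, fun m h1' h2' => by have : m = k := le_antisymm h2' h1'; subst this; exact h2⟩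
    · have : (d.set j true).getD k false = d.getD k false := by
        simp [List.getD_eq_getElem?_getD, List.getElem?_set_ne (Ne.symm hkj)]
      rw [this]
      congr 1
      rw [decide_eq_decide]
      constructor
      · rintro ⟨ha, hb, hc⟩
        exact ⟨by omega, hb, fun m hm1 hm2 => by
          rcases eq_or_ne m j with rfl | hmj
          · exact h2
          · exact hc m (by omega) hm2⟩
      · rintro ⟨ha, hb, hc⟩
        exact ⟨by omega, hb, fun m hm1 hm2 => hc m (by omega) hm2⟩
  | case2 j cnt d h1 h2 =>
    simp only [beq_iff_eq] at h2
    have : ¬ (j ≤ k ∧ k < n ∧ ∀ m, j ≤ m → m ≤ k → w.getD m default = ci) := by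
      rintro ⟨ha, hb, hc⟩
      exact h2 (hc j (le_refl _) ha)
    simp only [decide_eq_false this, Bool.or_false]
  | case3 j cnt d h1 =>
    have : ¬ (j ≤ k ∧ k < n ∧ ∀ m, j ≤ m → m ≤ k → w.getD m default = ci) := by
      rintro ⟨ha, hb, hc⟩
      omega
    simp only [decide_eq_false this, Bool.or_false]

theorem innerA_stop (w : List Char) (ci : Char) (n j cnt : Nat) (d : List Bool)
    (h : ¬ (j < n ∧ w.getD j default = ci)) : innerA w ci n j cnt d = (cnt, d) := by
  rw [innerA]
  split_ifs with h1 h2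
  · simp only [beq_iff_eq] at h2; exact absurd ⟨h1, h2⟩ h
  · rfl
  · rfl

theorem dFold_length (w : List Char) (m : Nat) :
    ((List.range m).foldl (fun d i =>
        if (innerA w (w.getD i default) w.length (i+1) 0 d).1 > 0
        then (innerA w (w.getD i default) w.length (i+1) 0 d).2.set i true
        else (innerA w (w.getD i default) w.length (i+1) 0 d).2) (List.replicate w.length false)).length = w.length := by
  induction m with
  | zero => simp
  | succ m ih =>
    rw [List.range_succ, List.foldl_append]
    simp only [List.foldl_cons, List.foldl_nil]
    split
    · rw [List.length_set, innerA_snd_length, ih]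
    · rw [innerA_snd_length, ih]

theorem dFinal_getD (w : List Char) (m : Nat) (hm : m ≤ w.length) (k : Nat) (hk : k < w.length) :
    (((List.range m).foldl (fun d i =>
        if (innerA w (w.getD i default) w.length (i+1) 0 d).1 > 0
        then (innerA w (w.getD i default) w.length (i+1) 0 d).2.set i true
        else (innerA w (w.getD i default) w.length (i+1) 0 d).2) (List.replicate w.length false)).getD k false = true)
      ↔ ∃ i < m, markP w i k := by
  induction m with
  | zero => simp [List.getD_eq_getElem?_getD, hk]
  | succ m ih =>
    have hm' : m ≤ w.length := by omega
    have ihm := ih hm'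
    rw [List.range_succ, List.foldl_append]
    simp only [List.foldl_cons, List.foldl_nil]
    set D := ((List.range m).foldl (fun d i =>
        if (innerA w (w.getD i default) w.length (i+1) 0 d).1 > 0
        then (innerA w (w.getD i default) w.length (i+1) 0 d).2.set i true
        else (innerA w (w.getD i default) w.length (i+1) 0 d).2) (List.replicate w.length false)) with hD
    have hDlen : D.length = w.length := dFold_length w m
    by_cases hpos : m + 1 < w.length ∧ w.getD (m+1) default = w.getD m default
    · have hfst : 0 < (innerA w (w.getD m default) w.length (m+1) 0 D).1 :=
        (innerA_fst_pos w (w.getD m default) w.length (m+1) D).mpr hpos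
      simp only [gt_iff_lt, hfst, if_pos]
      rcases eq_or_ne k m with rfl | hkm
      · have hlen : k < (innerA w (w.getD k default) w.length (k+1) 0 D).2.length := by
          rw [innerA_snd_length, hDlen]; exact hk
        have hset : ∀ (l : List Bool), k < l.length → (l.set k true).getD k false = true := by
          intro l h
          simp [List.getD_eq_getElem?_getD, List.getElem?_set_self', List.getElem?_eq_getElem h]
        rw [hset _ hlen]
        constructor
        · intro _
          exact ⟨k, Nat.lt_succ_self _, Or.inr ⟨rfl, hpos.1, hpos.2⟩⟩
        · intro _; rfl
      · have hset : ((innerA w (w.getD m default) w.length (m+1) 0 D).2.set m true).getD k false =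
            (innerA w (w.getD m default) w.length (m+1) 0 D).2.getD k false := by
          simp [List.getD_eq_getElem?_getD, List.getElem?_set_ne (Ne.symm hkm)]
        rw [hset, innerA_snd_getD w _ _ _ _ _ hDlen k]
        simp only [Bool.or_eq_true, decide_eq_true_eq, ihm]
        constructor
        · rintro (⟨i, hi, hmark⟩ | hc)
          · exact ⟨i, by omega, hmark⟩
          · exact ⟨m, Nat.lt_succ_self _, Or.inl hc⟩
        · rintro ⟨i, hi, hmark⟩
          rcases Nat.lt_succ_iff_lt_or_eq.mp hi with hi' | rfl
          · exact Or.inl ⟨i, hi', hmark⟩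
          · rcases hmark with hc | ⟨hki, _⟩
            · exact Or.inr hc
            · exact absurd hki hkm
    · have hstop : innerA w (w.getD m default) w.length (m+1) 0 D = (0, D) :=
        innerA_stop w _ _ _ _ _ hpos
      rw [hstop]
      simp only [gt_iff_lt, lt_irrefl, if_neg, not_false_iff]
      rw [ihm]
      constructor
      · rintro ⟨i, hi, hmark⟩; exact ⟨i, by omega, hmark⟩
      · rintro ⟨i, hi, hmark⟩
        rcases Nat.lt_succ_iff_lt_or_eq.mp hi with hi' | rfl
        · exact ⟨i, hi', hmark⟩
        · exfalso
          rcases hmark with ⟨h1, h2, h3⟩ | ⟨h1, h2, h3⟩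
          · exact hpos ⟨by omega, h3 (i+1) (le_refl _) h1⟩
          · exact hpos ⟨h2, h3⟩

theorem exists_mark_iff_nb (w : List Char) (k : Nat) (hk : k < w.length) :
    (∃ i < w.length, markP w i k) ↔ nbP w k := by
  constructor
  · rintro ⟨i, hi, ⟨h1, h2, h3⟩ | ⟨h1, h2, h3⟩⟩
    · left
      refine ⟨by omega, ?_⟩
      rcases eq_or_ne (i+1) k with he | hne
      · rw [show k - 1 = i by omega]
        exact (h3 k h1 (le_refl _)).symm
      · rw [h3 (k-1) (by omega) (by omega), h3 k h1 (le_refl _)]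
    · right
      subst h1
      exact ⟨h2, h3.symm⟩
  · rintro (⟨h1, h2⟩ | ⟨h1, h2⟩)
    · refine ⟨k-1, by omega, Or.inl ⟨by omega, hk, ?_⟩⟩
      intro m hm1 hm2
      have : m = k := by omega
      subst this
      exact h2.symm
    · exact ⟨k, hk, Or.inr ⟨rfl, h1, h2.symm⟩⟩

theorem keepB_iff (w : List Char) (i : Nat) :
    keepB w w.length i = true ↔ ¬ nbP w i := by
  unfold keepB nbP
  by_cases h1 : 0 < i <;> by_cases h2 : i+1 < w.length <;>
  by_cases h3 : w.getD (i-1) default = w.getD i default <;>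
  by_cases h4 : w.getD i default = w.getD (i+1) default <;>
  simp [h1, h2, h3, h4] <;> omega

theorem checkDuple_iff (w : List Char) :
    checkDupleL w = true ↔ ∃ i, i + 1 < w.length ∧ w.getD i default = w.getD (i+1) default := by
  simp only [checkDupleL, List.any_eq_true, List.mem_range, beq_iff_eq]
  constructor
  · rintro ⟨i, hi, he⟩
    exact ⟨i, by omega, he⟩
  · rintro ⟨i, hi, he⟩
    refine ⟨i, by omega, he⟩

theorem pass_eq (w : List Char) : passA w = passB w := by
  simp only [passA, passB]
  set D := ((List.range w.length).foldl (fun d i =>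
        if (innerA w (w.getD i default) w.length (i+1) 0 d).1 > 0
        then (innerA w (w.getD i default) w.length (i+1) 0 d).2.set i true
        else (innerA w (w.getD i default) w.length (i+1) 0 d).2) (List.replicate w.length false)) with hD
  have hfun : (fun (temp : List Char) i => if D.getD i false = true then temp else temp ++ [w.getD i default])
      = (fun temp i => if (!(D.getD i false)) = true then temp ++ [w.getD i default] else temp) := by
    funext temp i
    cases hDi : D.getD i false <;> simp
  rw [hfun, PySem.List.foldl_append_if]
  simp only [List.nil_append]
  congr 1
  apply List.filter_congr
  intro i hi
  have hi' := List.mem_range.mp hi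
  have h1 := dFinal_getD w w.length (le_refl _) i hi'
  rw [← hD, exists_mark_iff_nb w i hi'] at h1
  have h2 := keepB_iff w i
  cases hDi : D.getD i false with
  | false =>
    have hn : ¬ nbP w i := fun hn => by rw [h1.mpr hn] at hDi; cases hDi
    simp [h2.mpr hn]
  | true =>
    have hn : nbP w i := h1.mp hDi
    cases hk : keepB w w.length i
    · simp
    · exact absurd (h2.mp hk) (not_not_intro hn)

theorem pass_id (w : List Char) (h : checkDupleL w = false) : passB w = w := by
  have hno : ∀ i < w.length, ¬ nbP w i := by
    intro i hi hnb
    rw [← Bool.not_eq_true, checkDuple_iff] at h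
    rcases hnb with ⟨h1, h2⟩ | ⟨h1, h2⟩
    · refine h ⟨i-1, by omega, ?_⟩
      rw [show i - 1 + 1 = i from by omega]
      exact h2
    · exact h ⟨i, h1, h2⟩
  have hfilter : (List.range w.length).filter (fun i => keepB w w.length i) = List.range w.length := by
    apply List.filter_eq_self.mpr
    intro i hi
    exact (keepB_iff w i).mpr (hno i (List.mem_range.mp hi))
  rw [passB, hfilter]
  apply List.ext_getElem
  · simp
  · intro j h1 h2
    simp [List.getD_eq_getElem?_getD, List.getElem?_eq_getElem h2]

theorem pass_shrink (w : List Char) (h : checkDupleL w = true) :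
    (passB w).length < w.length := by
  rcases (checkDuple_iff w).mp h with ⟨i, hi, he⟩
  have hkeep : keepB w w.length i = false := by
    rw [← Bool.not_eq_true, keepB_iff]
    intro hc
    exact hc (Or.inr ⟨hi, he⟩)
  rw [passB, List.length_map]
  calc ((List.range w.length).filter (fun i => keepB w w.length i)).length
      < (List.range w.length).length := by
        apply List.length_filter_lt_length_iff_exists.mpr
        exact ⟨i, List.mem_range.mpr (by omega), by simp [hkeep]⟩
    _ = w.length := by simp

theorem loopA_eq_solveB (fuel : Nat) (l : List Char) (h : l.length < fuel) :
    loopA fuel l = solveB l := by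
  induction fuel generalizing l with
  | zero => omega
  | succ f ih =>
    rw [solveB]
    simp only [loopA]
    cases hc : checkDupleL l with
    | false =>
      simp only [Bool.false_eq_true, if_false]
      rw [pass_id l hc]
      simp
    | true =>
      simp only [if_true]
      have hs : (passB l).length < l.length := pass_shrink l hc
      rw [pass_eq]
      have hne : ((passB l).length == l.length) = false := by
        simp only [beq_eq_false_iff_ne, ne_eq]
        omega
      simp only [hne, Bool.false_eq_true, if_false]
      exact ih (passB l) (by omega)

-- ===== VERDICT (by name: the statement is the Claim_ definition above) =====
theorem solution_spec : Claim_equal_solution := by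
  intro c _
  unfold Spec_solution solution solution_alt
  rw [loopA_eq_solveB _ _ (Nat.lt_succ_self _)]
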